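-- pv_equiv track=rewrite | github.com/mtzig/math_comps | columbus.py | compute_S_l0
-- ===== SOURCE A (Python) =====
-- from math import gcd
--
-- def compute_S_l0(r: int) -> set:
--     '''
--     r is the square root of l0
--     '''
--     l_0 = r**2
--     S_l0 = set()
--
--     # we always include (1,0)
--     S_l0.add((1,0))
--     S_l0.add((0,1))
--
--     for i in range(1, r+1):
--         for j in range(i, r+1):
--             if gcd(i,j) == 1 : # relatively prime
--                 if i**2 + j**2 <= l_0:
--                     S_l0.add((i,j))
--                     S_l0.add((-i,j))
--                     S_l0.add((j,i))
--                     S_l0.add((-j,i))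
--
--     return S_l0
-- ===== SOURCE B (Python) =====
-- def _bad_pairs(r):
--     # sieve: mark every pair in [1,r]^2 whose coordinates share a nontrivial divisor
--     bad = set()
--     for d in range(2, r + 1):
--         mult = range(d, r + 1, d)
--         for a in mult:
--             for b in mult:
--                 bad.add((a, b))
--     return bad
--
-- def compute_S_l0(r: int) -> set:
--     '''
--     r is the square root of l0
--     '''
--     bad = _bad_pairs(r)
--     r2 = r * r
--     # seeds, then the diagonal's only contribution, then the strict upper triangle:
--     # each unmarked pair inside the circle contributes its four images, all fresh
--     pts = [(1, 0), (0, 1)]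
--     if r >= 2:
--         pts += [(1, 1), (-1, 1)]
--     for i in range(1, r + 1):
--         for j in range(i + 1, r + 1):
--             if (i, j) not in bad and i * i + j * j <= r2:
--                 pts += [(i, j), (-i, j), (j, i), (-j, i)]
--     return set(pts)
-- ===== Notes on version B (the rewrite author's own statement) =====
-- stated objective: alternative
-- what changed: A tests each pair with a gcd call and pushes four symmetric images of the closed triangle into a deduplicating set; B never computes a gcd: a first sieve pass marks every pair whose coordinates share a nontrivial divisor by enumerating that divisor's multiples, and a second pass walks the strict triangle once appending four fresh points per unmarked in-circle pair, with the seeds and the diagonal's sole contribution written in closed form, so no deduplication happens at all.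
import Mathlib
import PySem

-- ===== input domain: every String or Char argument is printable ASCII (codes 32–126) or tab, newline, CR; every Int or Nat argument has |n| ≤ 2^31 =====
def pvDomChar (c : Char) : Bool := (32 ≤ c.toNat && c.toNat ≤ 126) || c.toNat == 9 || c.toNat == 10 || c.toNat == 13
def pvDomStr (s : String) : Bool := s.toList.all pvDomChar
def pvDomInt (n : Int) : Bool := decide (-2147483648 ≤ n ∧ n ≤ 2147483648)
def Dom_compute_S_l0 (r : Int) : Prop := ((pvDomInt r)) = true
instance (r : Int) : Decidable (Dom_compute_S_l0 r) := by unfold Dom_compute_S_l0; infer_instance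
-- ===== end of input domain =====

-- B replaces A's per-pair gcd test and set-deduplicated 4-fold insertion over the closed triangle
-- by two passes with no gcd at all: a sieve pass marks every pair sharing a nontrivial divisor by
-- enumerating each candidate divisor's multiples, then one strict-triangle pass appends four fresh points per
-- unmarked in-circle pair, the seeds and the diagonal's sole contribution written in closed form.
-- Objective: alternative (same asymptotic cost, different algorithm).

-- ===== PORT A =====
def compute_S_l0 (r : Int) : List (Int × Int) :=
  let l_0 := r ^ 2
  (PySem.List.pyRange 1 (r + 1) 1).foldl
    (fun s i =>
      (PySem.List.pyRange i (r + 1) 1).foldl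
        (fun s j =>
          if Int.gcd i j = 1 then
            if i ^ 2 + j ^ 2 ≤ l_0 then
              PySem.Set.add (PySem.Set.add (PySem.Set.add (PySem.Set.add s (i, j)) (-i, j)) (j, i)) (-j, i)
            else s
          else s)
        s)
    (PySem.Set.add (PySem.Set.add (PySem.Set.empty) ((1 : Int), (0 : Int))) ((0 : Int), (1 : Int)))

-- ===== PORT B =====
-- helper _bad_pairs of Source B: the sieve of pairs with a common nontrivial divisor
def pvBadPairs (r : Int) : List (Int × Int) :=
  (PySem.List.pyRange 2 (r + 1) 1).foldl
    (fun bad d =>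
      let mult := PySem.List.pyRange d (r + 1) d
      mult.foldl (fun bad a => mult.foldl (fun bad b => PySem.Set.add bad (a, b)) bad) bad)
    PySem.Set.empty

def compute_S_l0_alt (r : Int) : List (Int × Int) :=
  PySem.Set.ofList
    ((PySem.List.pyRange 1 (r + 1) 1).foldl
      (fun pts i =>
        (PySem.List.pyRange (i + 1) (r + 1) 1).foldl
          (fun pts j =>
            if (i, j) ∉ pvBadPairs r ∧ i * i + j * j ≤ r * r then
              pts ++ [(i, j), (-i, j), (j, i), (-j, i)]
            else pts)
          pts)
      ([((1 : Int), (0 : Int)), ((0 : Int), (1 : Int))] ++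
        (if 2 ≤ r then [((1 : Int), (1 : Int)), ((-1 : Int), (1 : Int))] else [])))

-- ===== PRECONDITION & SPEC =====
def Spec_compute_S_l0 (r : Int) (out : List (Int × Int)) : Prop := out = compute_S_l0_alt r
instance (r : Int) (out : List (Int × Int)) : Decidable (Spec_compute_S_l0 r out) := by unfold Spec_compute_S_l0; infer_instance

-- ===== CLAIM (what is proved, stated in full; the proofs are below) =====
def Claim_equal_compute_S_l0 : Prop := ∀ (r : Int), Dom_compute_S_l0 r → Spec_compute_S_l0 r (compute_S_l0 r)

-- ===== LEMMAS AND PROOFS =====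

-- membership through a fold whose step adds exactly the elements described by Q
lemma pv_mem_foldl_iff {α β : Type} (Q : α → Prop) (g : List β → α → List β) (x : β)
    (hg : ∀ s y, x ∈ g s y ↔ x ∈ s ∨ Q y) :
    ∀ (l : List α) (init : List β), x ∈ l.foldl g init ↔ x ∈ init ∨ ∃ y ∈ l, Q y := by
  intro l
  induction l with
  | nil => intro init; simp
  | cons y l ih =>
    intro init
    rw [List.foldl_cons, ih, hg]
    simp only [List.mem_cons]
    constructor
    · rintro ((h | h) | ⟨z, hz, hq⟩)
      · exact Or.inl h
      · exact Or.inr ⟨y, Or.inl rfl, h⟩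
      · exact Or.inr ⟨z, Or.inr hz, hq⟩
    · rintro (h | ⟨z, (rfl | hz), hq⟩)
      · exact Or.inl (Or.inl h)
      · exact Or.inl (Or.inr hq)
      · exact Or.inr ⟨z, hz, hq⟩

lemma pvBad_mem (r : Int) (x : Int × Int) :
    x ∈ pvBadPairs r ↔
      ∃ d, d ∈ PySem.List.pyRange 2 (r + 1) 1 ∧
        ∃ a ∈ PySem.List.pyRange d (r + 1) d, ∃ b ∈ PySem.List.pyRange d (r + 1) d, x = (a, b) := by
  unfold pvBadPairs
  rw [pv_mem_foldl_iff
    (fun d => ∃ a ∈ PySem.List.pyRange d (r + 1) d, ∃ b ∈ PySem.List.pyRange d (r + 1) d, x = (a, b))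
    _ x ?_]
  · simp [PySem.Set.empty]
  · intro s d
    simp only
    rw [pv_mem_foldl_iff (fun a => ∃ b ∈ PySem.List.pyRange d (r + 1) d, x = (a, b)) _ x ?_]
    intro s' a
    exact PySem.Set.mem_foldl_add (PySem.List.pyRange d (r + 1) d) (fun b => (a, b)) s' x

-- inside the strict triangle the sieve test is exactly the coprimality test
lemma pvBad_iff (r i j : Int) (h1 : 1 ≤ i) (hij : i < j) (hjr : j ≤ r) :
    ((i, j) ∈ pvBadPairs r ↔ Int.gcd i j ≠ 1) := by
  rw [pvBad_mem]
  constructor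
  · rintro ⟨d, hd, a, ha, b, hb, hab⟩
    injection hab with hia hjb
    subst hia; subst hjb
    have hd2 : 2 ≤ d ∧ d < r + 1 := by rwa [PySem.List.mem_pyRange_one] at hd
    rw [PySem.List.mem_pyRange_iff_of_pos (by omega)] at ha hb
    have hdi : d ∣ i := by have := dvd_add ha.2.2 (dvd_refl d); simpa using this
    have hdj : d ∣ j := by have := dvd_add hb.2.2 (dvd_refl d); simpa using this
    have hdn : d.natAbs ∣ Int.gcd i j :=
      Nat.dvd_gcd (Int.natAbs_dvd_natAbs.mpr hdi) (Int.natAbs_dvd_natAbs.mpr hdj)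
    intro h1g
    rw [h1g] at hdn
    have := Nat.le_of_dvd one_pos hdn
    omega
  · intro hg
    have hi0 : (0 : Int) < i := by omega
    have hgne : Int.gcd i j ≠ 0 := by
      intro h0
      have := Int.gcd_eq_zero_iff.mp h0
      omega
    have hdvd_i : ((Int.gcd i j : Nat) : Int) ∣ i := Int.gcd_dvd_left i j
    have hdvd_j : ((Int.gcd i j : Nat) : Int) ∣ j := Int.gcd_dvd_right i j
    have hle_i : ((Int.gcd i j : Nat) : Int) ≤ i :=
      Int.le_of_dvd hi0 hdvd_i
    have h2 : (2 : Int) ≤ ((Int.gcd i j : Nat) : Int) := by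
      have : 1 ≤ Int.gcd i j := Nat.pos_of_ne_zero hgne
      have hne1 : Int.gcd i j ≠ 1 := hg
      omega
    refine ⟨((Int.gcd i j : Nat) : Int), ?_, i, ?_, j, ?_, rfl⟩
    · rw [PySem.List.mem_pyRange_one]
      omega
    · rw [PySem.List.mem_pyRange_iff_of_pos (by omega)]
      exact ⟨hle_i, by omega, dvd_sub hdvd_i (dvd_refl _)⟩
    · rw [PySem.List.mem_pyRange_iff_of_pos (by omega)]
      exact ⟨by omega, by omega, dvd_sub hdvd_j (dvd_refl _)⟩

-- The four symmetric images of a wedge pair (i, j).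
def pvQuad (i j : Int) : List (Int × Int) := [(i, j), (-i, j), (j, i), (-j, i)]

-- p is one of the two seed points, or an image of a wedge pair (a, b), 1 ≤ a ≤ b,
-- strictly before position (i, j) in the lexicographic traversal order.
def pvGood (i j : Int) (p : Int × Int) : Prop :=
  p = (1, 0) ∨ p = (0, 1) ∨
    ∃ a b : Int, 1 ≤ a ∧ a ≤ b ∧ (a < i ∨ (a = i ∧ b < j)) ∧
      (p = (a, b) ∨ p = (-a, b) ∨ p = (b, a) ∨ p = (-b, a))

def pvInv (i j : Int) (acc : List (Int × Int)) : Prop :=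
  acc.Nodup ∧ ∀ p ∈ acc, pvGood i j p

lemma pvGood_step {i j : Int} {p : Int × Int} (h : pvGood i j p) : pvGood i (j + 1) p := by
  rcases h with h | h | ⟨a, b, h1, h2, h3, h4⟩
  · exact Or.inl h
  · exact Or.inr (Or.inl h)
  · exact Or.inr (Or.inr ⟨a, b, h1, h2, by omega, h4⟩)

lemma pvGood_row {i i' j j' : Int} {p : Int × Int} (hi : i < i') (h : pvGood i j p) :
    pvGood i' j' p := by
  rcases h with h | h | ⟨a, b, h1, h2, h3, h4⟩
  · exact Or.inl h
  · exact Or.inr (Or.inl h)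
  · exact Or.inr (Or.inr ⟨a, b, h1, h2, by omega, h4⟩)

lemma pvFresh {i j : Int} (h1 : 1 ≤ i) (hij : i < j) :
    ∀ p ∈ pvQuad i j, ¬ pvGood i j p := by
  intro p hp hg
  simp only [pvQuad, List.mem_cons, List.not_mem_nil, or_false] at hp
  rcases hg with h | h | ⟨a, b, ha, hab, hc, h4⟩ <;>
    rcases hp with rfl | rfl | rfl | rfl <;>
    simp_all [Prod.ext_iff] <;> omega

lemma pvQuad_nodup {i j : Int} (h1 : 1 ≤ i) (hij : i < j) : (pvQuad i j).Nodup := by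
  simp [pvQuad, Prod.ext_iff]
  omega

lemma pvQuad_good {i j : Int} (h1 : 1 ≤ i) (hij : i < j) :
    ∀ p ∈ pvQuad i j, pvGood i (j + 1) p := by
  intro p hp
  simp only [pvQuad, List.mem_cons, List.not_mem_nil, or_false] at hp
  refine Or.inr (Or.inr ⟨i, j, h1, by omega, by omega, ?_⟩)
  tauto

lemma pvAddQuad {i j : Int} {acc : List (Int × Int)} (h1 : 1 ≤ i) (hij : i < j)
    (hinv : pvInv i j acc) :
    PySem.Set.add (PySem.Set.add (PySem.Set.add (PySem.Set.add acc (i, j)) (-i, j)) (j, i)) (-j, i)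
      = acc ++ pvQuad i j ∧ pvInv i (j + 1) (acc ++ pvQuad i j) := by
  obtain ⟨hnd, hgood⟩ := hinv
  have hnot : ∀ p ∈ pvQuad i j, p ∉ acc := fun p hp hmem => pvFresh h1 hij p hp (hgood p hmem)
  have m1 : ((i, j) : Int × Int) ∉ acc := hnot _ (by simp [pvQuad])
  have m2 : ((-i, j) : Int × Int) ∉ acc := hnot _ (by simp [pvQuad])
  have m3 : ((j, i) : Int × Int) ∉ acc := hnot _ (by simp [pvQuad])
  have m4 : ((-j, i) : Int × Int) ∉ acc := hnot _ (by simp [pvQuad])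
  have d1 : ((-i, j) : Int × Int) ≠ (i, j) := by simp [Prod.ext_iff]; omega
  have d2 : ((j, i) : Int × Int) ≠ (i, j) := by simp [Prod.ext_iff]; omega
  have d3 : ((j, i) : Int × Int) ≠ (-i, j) := by simp [Prod.ext_iff]; omega
  have d4 : ((-j, i) : Int × Int) ≠ (i, j) := by simp [Prod.ext_iff]; omega
  have d5 : ((-j, i) : Int × Int) ≠ (-i, j) := by simp [Prod.ext_iff]; omega
  have d6 : ((-j, i) : Int × Int) ≠ (j, i) := by simp [Prod.ext_iff]; omega
  have e1 : PySem.Set.add acc (i, j) = acc ++ [(i, j)] := PySem.Set.add_of_not_mem m1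
  have e2 : PySem.Set.add (acc ++ [(i, j)]) (-i, j) = acc ++ [(i, j)] ++ [(-i, j)] :=
    PySem.Set.add_of_not_mem
      (by simp only [List.mem_append, List.mem_singleton, not_or]; exact ⟨m2, d1⟩)
  have e3 : PySem.Set.add (acc ++ [(i, j)] ++ [(-i, j)]) (j, i)
      = acc ++ [(i, j)] ++ [(-i, j)] ++ [(j, i)] :=
    PySem.Set.add_of_not_mem
      (by simp only [List.mem_append, List.mem_singleton, not_or]; exact ⟨⟨m3, d2⟩, d3⟩)
  have e4 : PySem.Set.add (acc ++ [(i, j)] ++ [(-i, j)] ++ [(j, i)]) (-j, i)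
      = acc ++ [(i, j)] ++ [(-i, j)] ++ [(j, i)] ++ [(-j, i)] :=
    PySem.Set.add_of_not_mem
      (by simp only [List.mem_append, List.mem_singleton, not_or]; exact ⟨⟨⟨m4, d4⟩, d5⟩, d6⟩)
  have heq : acc ++ [(i, j)] ++ [(-i, j)] ++ [(j, i)] ++ [(-j, i)] = acc ++ pvQuad i j := by
    simp [pvQuad]
  refine ⟨by rw [e1, e2, e3, e4, heq], ?_, ?_⟩
  · exact List.Nodup.append hnd (pvQuad_nodup h1 hij) (fun x hx hq => hnot x hq hx)
  · intro p hp
    rcases List.mem_append.mp hp with h | h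
    · exact pvGood_step (hgood p h)
    · exact pvQuad_good h1 hij p h

lemma pvInnerEq (r i : Int) : ∀ (n : Nat) (j : Int) (acc : List (Int × Int)),
    1 ≤ i → i < j → (r + 1 - j).toNat = n → pvInv i j acc →
    ∃ res,
      (PySem.List.pyRange j (r + 1) 1).foldl
        (fun s j =>
          if Int.gcd i j = 1 then
            if i ^ 2 + j ^ 2 ≤ r ^ 2 then
              PySem.Set.add (PySem.Set.add (PySem.Set.add (PySem.Set.add s (i, j)) (-i, j)) (j, i)) (-j, i)
            else s
          else s) acc = res ∧
      (PySem.List.pyRange j (r + 1) 1).foldl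
        (fun pts j =>
          if (i, j) ∉ pvBadPairs r ∧ i * i + j * j ≤ r * r then
            pts ++ [(i, j), (-i, j), (j, i), (-j, i)]
          else pts) acc = res ∧
      pvInv (i + 1) (i + 2) res := by
  intro n
  induction n with
  | zero =>
    intro j acc h1 hij hn hinv
    rw [PySem.List.pyRange_one_eq_nil (by omega)]
    exact ⟨acc, rfl, rfl, hinv.1, fun p hp => pvGood_row (by omega) (hinv.2 p hp)⟩
  | succ n ih =>
    intro j acc h1 hij hn hinv
    rw [PySem.List.pyRange_one_cons (show j < r + 1 by omega)]
    simp only [List.foldl_cons]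
    have hsq : (i ^ 2 + j ^ 2 ≤ r ^ 2) ↔ (i * i + j * j ≤ r * r) := by
      rw [pow_two, pow_two, pow_two]
    have hbad : ((i, j) ∈ pvBadPairs r ↔ Int.gcd i j ≠ 1) :=
      pvBad_iff r i j h1 hij (by omega)
    by_cases hg : Int.gcd i j = 1
    · by_cases hle : i ^ 2 + j ^ 2 ≤ r ^ 2
      · obtain ⟨heq, hinv'⟩ := pvAddQuad h1 hij hinv
        rw [if_pos hg, if_pos hle,
          if_pos ⟨fun hm => (hbad.mp hm) hg, hsq.mp hle⟩, heq]
        have hq : acc ++ [(i, j), (-i, j), (j, i), (-j, i)] = acc ++ pvQuad i j := rfl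
        rw [hq]
        exact ih (j + 1) _ h1 (by omega) (by omega) hinv'
      · rw [if_pos hg, if_neg hle,
          if_neg (by rintro ⟨_, h⟩; exact hle (hsq.mpr h))]
        exact ih (j + 1) acc h1 (by omega) (by omega)
          ⟨hinv.1, fun p hp => pvGood_step (hinv.2 p hp)⟩
    · rw [if_neg hg, if_neg (by rintro ⟨hnb, _⟩; exact hnb (hbad.mpr hg))]
      exact ih (j + 1) acc h1 (by omega) (by omega)
        ⟨hinv.1, fun p hp => pvGood_step (hinv.2 p hp)⟩

lemma pvOuterEq (r : Int) : ∀ (n : Nat) (i : Int) (acc : List (Int × Int)),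
    2 ≤ i → (r + 1 - i).toNat = n → pvInv i (i + 1) acc →
    ∃ res,
      (PySem.List.pyRange i (r + 1) 1).foldl
        (fun s i =>
          (PySem.List.pyRange i (r + 1) 1).foldl
            (fun s j =>
              if Int.gcd i j = 1 then
                if i ^ 2 + j ^ 2 ≤ r ^ 2 then
                  PySem.Set.add (PySem.Set.add (PySem.Set.add (PySem.Set.add s (i, j)) (-i, j)) (j, i)) (-j, i)
                else s
              else s) s) acc = res ∧
      (PySem.List.pyRange i (r + 1) 1).foldl
        (fun pts i =>
          (PySem.List.pyRange (i + 1) (r + 1) 1).foldl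
            (fun pts j =>
              if (i, j) ∉ pvBadPairs r ∧ i * i + j * j ≤ r * r then
                pts ++ [(i, j), (-i, j), (j, i), (-j, i)]
              else pts) pts) acc = res ∧
      res.Nodup := by
  intro n
  induction n with
  | zero =>
    intro i acc h2 hn hinv
    rw [PySem.List.pyRange_one_eq_nil (by omega)]
    exact ⟨acc, rfl, rfl, hinv.1⟩
  | succ n ih =>
    intro i acc h2 hn hinv
    rw [PySem.List.pyRange_one_cons (show i < r + 1 by omega)]
    simp only [List.foldl_cons]
    rw [PySem.List.pyRange_one_cons (show i < r + 1 by omega)]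
    simp only [List.foldl_cons]
    rw [if_neg (by rw [Int.gcd_self]; omega)]
    obtain ⟨res1, hA, hB, hinv1⟩ :=
      pvInnerEq r i ((r + 1 - (i + 1)).toNat) (i + 1) acc (by omega) (by omega) rfl hinv
    rw [hA, hB]
    have hinv1' : pvInv (i + 1) (i + 1 + 1) res1 := by
      rwa [show i + 1 + 1 = i + 2 by ring]
    exact ih (i + 1) res1 (by omega) (by omega) hinv1'

lemma pvBaseInv (r : Int) :
    pvInv 1 2 ([((1 : Int), (0 : Int)), ((0 : Int), (1 : Int))] ++
      (if 2 ≤ r then [((1 : Int), (1 : Int)), ((-1 : Int), (1 : Int))] else [])) := by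
  split_ifs with h
  · refine ⟨by decide, ?_⟩
    intro p hp
    simp only [List.cons_append, List.nil_append, List.mem_cons, List.not_mem_nil, or_false] at hp
    rcases hp with rfl | rfl | rfl | rfl
    · exact Or.inl rfl
    · exact Or.inr (Or.inl rfl)
    · exact Or.inr (Or.inr ⟨1, 1, by omega, by omega, by omega, Or.inl rfl⟩)
    · exact Or.inr (Or.inr ⟨1, 1, by omega, by omega, by omega, Or.inr (Or.inl rfl)⟩)
  · refine ⟨by decide, ?_⟩
    intro p hp
    simp only [List.append_nil, List.mem_cons, List.not_mem_nil, or_false] at hp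
    rcases hp with rfl | rfl
    · exact Or.inl rfl
    · exact Or.inr (Or.inl rfl)

-- ===== VERDICT (by name: the statement is the Claim_ definition above) =====
theorem compute_S_l0_spec : Claim_equal_compute_S_l0 := by
  intro r _
  unfold Spec_compute_S_l0
  show compute_S_l0 r = compute_S_l0_alt r
  simp only [compute_S_l0, compute_S_l0_alt]
  by_cases hr : 1 ≤ r
  · by_cases h2 : 2 ≤ r
    · rw [PySem.List.pyRange_one_cons (show (1 : Int) < r + 1 by omega)]
      simp only [List.foldl_cons]
      rw [PySem.List.pyRange_one_cons (show (1 : Int) < r + 1 by omega)]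
      simp only [List.foldl_cons]
      rw [if_pos (show Int.gcd 1 1 = 1 by decide),
        if_pos (show (1 : Int) ^ 2 + 1 ^ 2 ≤ r ^ 2 by nlinarith), if_pos h2]
      rw [show (1 : Int) + 1 = 2 by norm_num]
      have hchain :
          PySem.Set.add (PySem.Set.add (PySem.Set.add (PySem.Set.add
            (PySem.Set.add (PySem.Set.add (PySem.Set.empty) ((1 : Int), (0 : Int)))
              ((0 : Int), (1 : Int))) (1, 1)) (-1, 1)) (1, 1)) (-1, 1)
          = [((1 : Int), (0 : Int)), ((0 : Int), (1 : Int))] ++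
              [((1 : Int), (1 : Int)), ((-1 : Int), (1 : Int))] := by decide
      rw [hchain]
      have hbase := pvBaseInv r
      rw [if_pos h2] at hbase
      obtain ⟨res1, hA1, hB1, hinv1⟩ :=
        pvInnerEq r 1 ((r + 1 - 2).toNat) 2
          ([((1 : Int), (0 : Int)), ((0 : Int), (1 : Int))] ++
            [((1 : Int), (1 : Int)), ((-1 : Int), (1 : Int))])
          (by omega) (by omega) rfl hbase
      rw [hA1, hB1]
      have hinv1' : pvInv 2 (2 + 1) res1 := by norm_num at hinv1 ⊢; exact hinv1
      obtain ⟨res, hA2, hB2, hnd⟩ :=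
        pvOuterEq r ((r + 1 - 2).toNat) 2 res1 (by omega) rfl hinv1'
      rw [hA2, hB2]
      exact (PySem.Set.ofList_eq_self_of_nodup res hnd).symm
    · have h1 : r = 1 := by omega
      subst h1
      decide
  · rw [PySem.List.pyRange_one_eq_nil (by omega), if_neg (by omega)]
    simp only [List.foldl_nil, List.append_nil]
    decide
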